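-- pv_equiv track=rewrite | github.com/OpenLLM-France/Luciole-Training | training/train/dataloader.py | split_before_item
-- ===== SOURCE A (Python) =====
-- def split_before_item(lst, item):
--     result = []
--     current = []
--     for elem in lst:
--         if elem == item and current:
--             result.append(current)
--             current = []
--         current.append(elem)
--     if current:
--         result.append(current)
--     return result
-- ===== SOURCE B (Python) =====
-- def split_before_item(lst, item):
--     result = []
--     start = 0
--     while start < len(lst):
--         cut = len(lst)
--         for k in range(start + 1, len(lst)):
--             if lst[k] == item:
--                 cut = k
--                 break
--         result.append(lst[start:cut])
--         start = cut
--     return result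
-- ===== Notes on version B (the rewrite author's own statement) =====
-- stated objective: alternative
-- what changed: Replaces A's element-by-element accumulator (result/current lists mutated per element) with an index-and-slice chunk loop: find the next split index after the current start, slice off the whole chunk at once, and continue from there.
import Mathlib
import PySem

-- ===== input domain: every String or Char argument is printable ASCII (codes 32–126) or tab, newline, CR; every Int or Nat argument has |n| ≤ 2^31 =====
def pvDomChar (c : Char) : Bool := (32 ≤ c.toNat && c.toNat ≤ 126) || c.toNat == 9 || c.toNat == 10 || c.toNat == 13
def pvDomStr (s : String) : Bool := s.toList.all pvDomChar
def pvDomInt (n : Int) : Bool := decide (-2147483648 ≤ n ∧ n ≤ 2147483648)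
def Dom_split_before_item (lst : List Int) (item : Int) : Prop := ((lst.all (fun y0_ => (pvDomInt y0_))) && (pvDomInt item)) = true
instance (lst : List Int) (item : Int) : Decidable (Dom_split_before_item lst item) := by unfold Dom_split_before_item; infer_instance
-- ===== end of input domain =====

-- B re-implements A's accumulator pass as a recursive slice-off-one-chunk decomposition; same cost, different structure.

-- ===== PORT A =====
-- A's for-loop over lst with state (result, current), branch and appends exactly as in the Python
def split_before_item (lst : List Int) (item : Int) : List (List Int) :=
  let st := lst.foldl (fun (st : List (List Int) × List Int) elem =>
    let result := st.1
    let current := st.2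
    if elem == item && !current.isEmpty then
      (result ++ [current], [elem])
    else
      (result, current ++ [elem])) ([], [])
  if !st.2.isEmpty then st.1 ++ [st.2] else st.1

-- ===== PORT B =====
-- Source B's while-loop advances `start` from one chunk boundary to the next; its transcription is
-- recursion on the suffix lst[start:].  The inner scan `for k in range(start+1, len(lst)): if
-- lst[k] == item: cut = k; break` plus the slices lst[start:cut] / lst[cut:] is exactly
-- lst[start:cut] = head :: rest.takeWhile (· != item) and lst[cut:] = rest.dropWhile (· != item);
-- takeWhile/dropWhile are the library counterparts of that first-index scan plus the two slices.
def split_before_item_alt (lst : List Int) (item : Int) : List (List Int) :=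
  match lst with
  | [] => []
  | x :: rest =>
      (x :: rest.takeWhile (· != item)) :: split_before_item_alt (rest.dropWhile (· != item)) item
termination_by lst.length
decreasing_by
  simp only [List.length_cons]
  exact Nat.lt_succ_of_le (List.length_dropWhile_le _ _)

-- ===== PRECONDITION & SPEC =====
def Spec_split_before_item (lst : List Int) (item : Int) (out : List (List Int)) : Prop := out = split_before_item_alt lst item
instance (lst : List Int) (item : Int) (out : List (List Int)) : Decidable (Spec_split_before_item lst item out) := by unfold Spec_split_before_item; infer_instance

-- ===== CLAIM (what is proved, stated in full; the proofs are below) =====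
def Claim_equal_split_before_item : Prop := ∀ (lst : List Int) (item : Int), Dom_split_before_item lst item → Spec_split_before_item lst item (split_before_item lst item)

-- ===== LEMMAS AND PROOFS =====

-- A's loop body, named for the proofs (definitionally the lambda in split_before_item)
def pvStep (item : Int) (st : List (List Int) × List Int) (elem : Int) : List (List Int) × List Int :=
  if elem == item && !st.2.isEmpty then (st.1 ++ [st.2], [elem]) else (st.1, st.2 ++ [elem])

def pvFinish (st : List (List Int) × List Int) : List (List Int) :=
  if !st.2.isEmpty then st.1 ++ [st.2] else st.1

-- continuing A's loop with a nonempty `current` over the rest of the list, then finishing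
def pvCont (item : Int) (cur : List Int) : List Int → List (List Int)
  | [] => [cur]
  | e :: l => if e == item then cur :: pvCont item [e] l else pvCont item (cur ++ [e]) l

theorem pvCont_eq (item : Int) (l : List Int) : ∀ cur : List Int,
    pvCont item cur l =
      (cur ++ l.takeWhile (· != item)) :: split_before_item_alt (l.dropWhile (· != item)) item := by
  induction l with
  | nil => intro cur; simp [pvCont, split_before_item_alt]
  | cons e l ih =>
      intro cur
      by_cases he : e = item
      · subst he
        simp [pvCont, ih, split_before_item_alt]
      · have hne : (e == item) = false := by simp [he]
        simp [pvCont, hne, he, ih, List.append_assoc]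

-- A's fold from state (res, cur) with cur ≠ [], then finishing, is res ++ pvCont item cur l
theorem pvFold_eq (item : Int) (l : List Int) : ∀ (res : List (List Int)) (cur : List Int),
    cur ≠ [] → pvFinish (l.foldl (pvStep item) (res, cur)) = res ++ pvCont item cur l := by
  induction l with
  | nil =>
      intro res cur hcur
      simp [pvFinish, pvCont, hcur]
  | cons e l ih =>
      intro res cur hcur
      by_cases he : e = item
      · subst he
        have hstep : pvStep e (res, cur) e = (res ++ [cur], [e]) := by
          simp [pvStep, hcur]
        simp only [List.foldl_cons, hstep, pvCont]
        rw [ih (res ++ [cur]) [e] (by simp)]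
        simp [List.append_assoc]
      · have hne : (e == item) = false := by simp [he]
        have hstep : pvStep item (res, cur) e = (res, cur ++ [e]) := by
          simp [pvStep, hne]
        simp only [List.foldl_cons, hstep, pvCont, hne, Bool.false_eq_true, if_false]
        exact ih res (cur ++ [e]) (by simp)

-- ===== VERDICT (by name: the statement is the Claim_ definition above) =====
theorem split_before_item_spec : Claim_equal_split_before_item := by
  intro lst item _
  unfold Spec_split_before_item
  show split_before_item lst item = _
  cases lst with
  | nil => simp [split_before_item, split_before_item_alt]
  | cons x rest =>
      have h0 : split_before_item (x :: rest) item
          = pvFinish (rest.foldl (pvStep item) (pvStep item ([], []) x)) := rfl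
      have h1 : pvStep item ([], ([] : List Int)) x = ([], [x]) := by simp [pvStep]
      rw [h0, h1, pvFold_eq item rest [] [x] (by simp), pvCont_eq]
      simp [split_before_item_alt]
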